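-- pv_equiv track=rewrite | github.com/nishi10mo/AtCoder | practice/AtCoder Beginner Contest/ABC295/B.py | f
-- ===== SOURCE A (Python) =====
-- import copy
--
-- def f(R, C, B):
--     def bomb(i, j, b, impact):
--         for x in range(impact+1):
--             for y in range(impact+1-x):
--                 if i - x >= 0:
--                     if j - y >= 0:
--                         if b[i-x][j-y] == "#":
--                             b[i-x][j-y] = "."
--                     if j + y < C:
--                         if b[i-x][j+y] == "#":
--                             b[i-x][j+y] = "."
--                 if i + x < R:
--                     if j - y >= 0:
--                         if b[i+x][j-y] == "#":
--                             b[i+x][j-y] = "."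
--                     if j + y < C:
--                         if b[i+x][j+y] == "#":
--                             b[i+x][j+y] = "."
--         return b
--     b = copy.deepcopy(B)
--     for i in range(R):
--         for j in range(C):
--             if b[i][j] != "." and b[i][j] != "#":
--                 b = bomb(i, j, b, int(b[i][j]))
--                 b[i][j] = "."
--     return b
-- ===== SOURCE B (Python) =====
-- def f(R, C, B):
--     # Collect the bombs once, then rewrite each cell of the R x C box in one pass,
--     # deciding it by membership in some bomb's Manhattan blast.
--     bombs = [(i, j, int(B[i][j]))
--              for i in range(R) for j in range(C)
--              if B[i][j] != "#" and B[i][j] != "."]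
--
--     def blasted(i, j):
--         return any(abs(i - r) + abs(j - c) <= d for (r, c, d) in bombs)
--
--     b = [row[:] for row in B]
--     for i in range(R):
--         for j in range(C):
--             if (B[i][j] != "#" and B[i][j] != ".") or blasted(i, j):
--                 b[i][j] = "."
--     return b
-- ===== Notes on version B (the rewrite author's own statement) =====
-- stated objective: alternative
-- what changed: Replaces the sequential bomb-centric mutation (for each bomb, walk its Manhattan diamond clearing '#' cells in place) by a cell-centric pass: collect all bombs (row, col, radius) once, then rewrite each cell of the R x C box in a single pass, setting it to '.' iff it is a bomb or lies in some bomb's blast.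
import Mathlib
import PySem

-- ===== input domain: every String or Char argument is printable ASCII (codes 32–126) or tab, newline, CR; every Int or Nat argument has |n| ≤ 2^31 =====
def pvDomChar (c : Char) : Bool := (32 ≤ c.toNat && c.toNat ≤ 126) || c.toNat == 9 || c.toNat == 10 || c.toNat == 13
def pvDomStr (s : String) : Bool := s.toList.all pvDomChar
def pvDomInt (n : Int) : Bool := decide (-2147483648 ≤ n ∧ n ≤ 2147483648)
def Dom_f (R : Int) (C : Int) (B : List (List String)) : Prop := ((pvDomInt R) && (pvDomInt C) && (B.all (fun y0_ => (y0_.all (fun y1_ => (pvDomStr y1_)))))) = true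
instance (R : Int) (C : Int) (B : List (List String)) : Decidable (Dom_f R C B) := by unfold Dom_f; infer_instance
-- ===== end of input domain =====

-- B replaces A's in-place bomb-by-bomb diamond clearing with a cell-centric pass over a bomb index;
-- A deep-copies its input (no observable mutation), B builds a fresh grid: return values agree on Pre_f.


-- ===== PORT A =====
-- cell read/write helpers; every index at a use site is nonnegative
-- (outer loops run over range(R)/range(C); blast indices are guarded by 'i - x >= 0' etc.),
-- so the '.toNat' conversion is exact there.
def gget (g : List (List String)) (i j : Nat) : String := (g.getD i []).getD j ""
def gset (g : List (List String)) (i j : Nat) (v : String) : List (List String) :=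
  g.modify i (fun row => row.set j v)
def getCell (g : List (List String)) (i j : Int) : String := gget g i.toNat j.toNat
def setCell (g : List (List String)) (i j : Int) (v : String) : List (List String) :=
  gset g i.toNat j.toNat v
-- "if b[p][q] == '#': b[p][q] = '.'"
def clearIf (g : List (List String)) (i j : Int) : List (List String) :=
  if getCell g i j = "#" then setCell g i j "." else g

-- the nested helper 'bomb' of A
def bomb (R : Int) (C : Int) (i : Int) (j : Int) (g : List (List String)) (impact : Int) :
    List (List String) :=
  (PySem.List.pyRange 0 (impact + 1) 1).foldl (fun b x =>
    (PySem.List.pyRange 0 (impact + 1 - x) 1).foldl (fun b y =>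
      let b1 := if 0 ≤ i - x then
          (let b' := if 0 ≤ j - y then clearIf b (i - x) (j - y) else b
           if j + y < C then clearIf b' (i - x) (j + y) else b')
        else b
      if i + x < R then
          (let b' := if 0 ≤ j - y then clearIf b1 (i + x) (j - y) else b1
           if j + y < C then clearIf b' (i + x) (j + y) else b')
        else b1) b) g

def f (R : Int) (C : Int) (B : List (List String)) : List (List String) :=
  -- b = copy.deepcopy(B) is the identity on immutable Lean values
  (PySem.List.pyRange 0 R 1).foldl (fun b i =>
    (PySem.List.pyRange 0 C 1).foldl (fun b j =>
      if getCell b i j ≠ "." ∧ getCell b i j ≠ "#" then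
        setCell (bomb R C i j b ((PySem.Int.ofStr? (getCell b i j)).getD 0)) i j "."
      else b) b) B

-- ===== PORT B =====
-- bombs = [(i, j, int(B[i][j])) for i in range(R) for j in range(C) if B[i][j] != "#" and B[i][j] != "."]
def bombsOf (R : Int) (C : Int) (B : List (List String)) : List (Int × Int × Int) :=
  (PySem.List.pyRange 0 R 1).flatMap (fun i =>
    (PySem.List.pyRange 0 C 1).filterMap (fun j =>
      if getCell B i j ≠ "#" ∧ getCell B i j ≠ "." then
        some (i, j, (PySem.Int.ofStr? (getCell B i j)).getD 0)
      else none))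

def blasted (bombs : List (Int × Int × Int)) (i : Int) (j : Int) : Bool :=
  bombs.any (fun b => decide (|i - b.1| + |j - b.2.1| ≤ b.2.2))

-- b = [row[:] for row in B]; for i in range(R): for j in range(C): decide b[i][j]
def f_alt (R : Int) (C : Int) (B : List (List String)) : List (List String) :=
  let bombs := bombsOf R C B
  (PySem.List.pyRange 0 R 1).foldl (fun b i =>
    (PySem.List.pyRange 0 C 1).foldl (fun b j =>
      if (getCell B i j ≠ "#" ∧ getCell B i j ≠ ".") ∨ blasted bombs i j then
        setCell b i j "."
      else b) b) B

-- ===== PRECONDITION & SPEC =====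
-- Pre_f = exactly the inputs on which the Python A returns: every cell of the first R rows ×
-- C columns exists (else IndexError) and, when it is neither "#" nor ".", parses as an int
-- (else ValueError from int()).
def Pre_f (R : Int) (C : Int) (B : List (List String)) : Prop :=
  C ≤ 0 ∨ R ≤ 0 ∨
    (R ≤ B.length ∧ ∀ row ∈ B.take R.toNat, C ≤ row.length ∧
      ∀ s ∈ row.take C.toNat, s = "#" ∨ s = "." ∨ (PySem.Int.ofStr? s).isSome = true)
instance (R : Int) (C : Int) (B : List (List String)) : Decidable (Pre_f R C B) := by
  unfold Pre_f; infer_instance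

def pvWitness_f : Int × Int × List (List String) := (2, 2, [["#", "1"], [".", "#"]])

def Spec_f (R : Int) (C : Int) (B : List (List String)) (out : List (List String)) : Prop :=
  out = f_alt R C B
instance (R : Int) (C : Int) (B : List (List String)) (out : List (List String)) :
    Decidable (Spec_f R C B out) := by unfold Spec_f; infer_instance

-- ===== CLAIM (what is proved, stated in full; the proofs are below) =====
def Claim_equal_f : Prop := ∀ (R : Int) (C : Int) (B : List (List String)),
  Dom_f R C B → Pre_f R C B → Spec_f R C B (f R C B)

-- ===== LEMMAS AND PROOFS =====

-- Elementary grid operations: clear-at ("set to '.' if currently '#'") and set-at (unconditional '.').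
inductive GOp where
  | cl : Nat → Nat → GOp
  | st : Nat → Nat → GOp
deriving DecidableEq, Repr

def gstep (g : List (List String)) : GOp → List (List String)
  | .cl a b => if gget g a b = "#" then gset g a b "." else g
  | .st a b => gset g a b "."

def gapply (ops : List GOp) (g : List (List String)) : List (List String) :=
  ops.foldl gstep g

def gposOf : GOp → Nat × Nat
  | .cl a b => (a, b)
  | .st a b => (a, b)

def gvalid (g : List (List String)) (p : Nat × Nat) : Prop :=
  p.1 < g.length ∧ p.2 < (g.getD p.1 []).length

theorem gset_length (g : List (List String)) (i j : Nat) (v : String) :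
    (gset g i j v).length = g.length := by simp [gset]

theorem gset_row_length (g : List (List String)) (i j : Nat) (v : String) (a : Nat) :
    ((gset g i j v).getD a []).length = (g.getD a []).length := by
  simp only [gset, List.getD_eq_getElem?_getD, List.getElem?_modify]
  cases h : g[a]? <;> (simp; try split) <;> simp

theorem gget_gset (g : List (List String)) (i j : Nat) (v : String)
    (hi : i < g.length) (hj : j < (g.getD i []).length) (a b : Nat) :
    gget (gset g i j v) a b = if a = i ∧ b = j then v else gget g a b := by
  have hga : g[i]? = some g[i] := List.getElem?_eq_getElem hi
  rw [List.getD_eq_getElem?_getD, hga] at hj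
  simp only [Option.getD_some] at hj
  by_cases hai : a = i
  · subst hai
    simp only [gget, gset, List.getD_eq_getElem?_getD, List.getElem?_modify, hga,
      Option.getD_some, true_and]
    by_cases hbj : b = j
    · subst hbj; simp [hj]
    · simp [hbj, Ne.symm hbj]
  · have hno : ¬ (a = i ∧ b = j) := fun h => hai h.1
    simp only [gget, gset, List.getD_eq_getElem?_getD, List.getElem?_modify,
      if_neg (Ne.symm hai), if_neg hno]
    cases h : g[a]? <;> simp

theorem gstep_length (g : List (List String)) (o : GOp) :
    (gstep g o).length = g.length := by
  cases o with
  | cl a b => simp only [gstep]; split <;> simp [gset_length]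
  | st a b => simp [gstep, gset_length]

theorem gstep_row_length (g : List (List String)) (o : GOp) (a : Nat) :
    ((gstep g o).getD a []).length = (g.getD a []).length := by
  cases o with
  | cl c d =>
    simp only [gstep]; split
    · exact gset_row_length g c d "." a
    · rfl
  | st c d => exact gset_row_length g c d "." a

theorem gvalid_gstep (g : List (List String)) (o : GOp) (p : Nat × Nat) :
    gvalid (gstep g o) p ↔ gvalid g p := by
  unfold gvalid
  rw [gstep_length, gstep_row_length]

theorem gget_gstep_ne (g : List (List String)) (o : GOp) (i j : Nat)
    (hne : gposOf o ≠ (i, j)) (hv : gvalid g (gposOf o)) :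
    gget (gstep g o) i j = gget g i j := by
  cases o with
  | cl a b =>
    simp only [gstep]; split
    · rw [gget_gset g a b "." hv.1 hv.2 i j, if_neg]
      intro h; exact hne (by simp [gposOf, h.1, h.2])
    · rfl
  | st a b =>
    simp only [gstep]
    rw [gget_gset g a b "." hv.1 hv.2 i j, if_neg]
    intro h; exact hne (by simp [gposOf, h.1, h.2])

-- pointwise characterisation of a sequence of clear/set operations
theorem gapply_char (ops : List GOp) (g : List (List String))
    (hv : ∀ o ∈ ops, gvalid g (gposOf o)) (i j : Nat) :
    gget (gapply ops g) i j =
      if GOp.st i j ∈ ops then "."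
      else if GOp.cl i j ∈ ops ∧ gget g i j = "#" then "."
      else gget g i j := by
  induction ops generalizing g with
  | nil => simp [gapply]
  | cons o t ih =>
    have hvo : gvalid g (gposOf o) := hv o (List.mem_cons_self)
    have hvt : ∀ o' ∈ t, gvalid (gstep g o) (gposOf o') := fun o' h =>
      (gvalid_gstep g o (gposOf o')).mpr (hv o' (List.mem_cons_of_mem _ h))
    have step_eq : gapply (o :: t) g = gapply t (gstep g o) := rfl
    rw [step_eq, ih (gstep g o) hvt]
    by_cases hpos : gposOf o = (i, j)
    · cases o with
      | st a b =>
        simp only [gposOf, Prod.mk.injEq] at hpos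
        obtain ⟨rfl, rfl⟩ := hpos
        have : gget (gstep g (GOp.st a b)) a b = "." := by
          simp only [gstep]; rw [gget_gset g a b "." hvo.1 hvo.2 a b]; simp
        simp only [List.mem_cons, this]
        by_cases hst : GOp.st a b ∈ t <;> simp [hst]
      | cl a b =>
        simp only [gposOf, Prod.mk.injEq] at hpos
        obtain ⟨rfl, rfl⟩ := hpos
        have hstmem : (GOp.st a b ∈ (GOp.cl a b :: t)) ↔ GOp.st a b ∈ t := by simp
        by_cases hsharp : gget g a b = "#"
        · have : gget (gstep g (GOp.cl a b)) a b = "." := by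
            simp only [gstep, if_pos hsharp]
            rw [gget_gset g a b "." hvo.1 hvo.2 a b]; simp
          simp [this, hstmem, hsharp]
        · have : gget (gstep g (GOp.cl a b)) a b = gget g a b := by
            simp [gstep, if_neg hsharp]
          simp [this, hsharp]
    · have hgg : gget (gstep g o) i j = gget g i j := gget_gstep_ne g o i j hpos hvo
      have hne_st : o ≠ GOp.st i j := by rintro rfl; exact hpos rfl
      have hne_cl : o ≠ GOp.cl i j := by rintro rfl; exact hpos rfl
      simp [hgg, List.mem_cons, Ne.symm hne_st, Ne.symm hne_cl]

theorem gapply_length (ops : List GOp) (g : List (List String)) :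
    (gapply ops g).length = g.length := by
  induction ops generalizing g with
  | nil => rfl
  | cons o t ih =>
    show (gapply t (gstep g o)).length = g.length
    rw [ih, gstep_length]

theorem gapply_row_length (ops : List GOp) (g : List (List String)) (a : Nat) :
    ((gapply ops g).getD a []).length = (g.getD a []).length := by
  induction ops generalizing g with
  | nil => rfl
  | cons o t ih =>
    show ((gapply t (gstep g o)).getD a []).length = _
    rw [ih, gstep_row_length]

theorem gapply_append (u v : List GOp) (g : List (List String)) :
    gapply (u ++ v) g = gapply v (gapply u g) := by
  simp [gapply, List.foldl_append]

theorem foldl_flatMap_eq {α β γ : Type} (l : List α) (h : α → List β) (s : γ → β → γ) (g : γ) :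
    (l.flatMap h).foldl s g = l.foldl (fun g x => (h x).foldl s g) g := by
  induction l generalizing g with
  | nil => rfl
  | cons x t ih => simp [List.flatMap_cons, List.foldl_append, ih]

-- the op list of one bomb blast
def opsBomb (R C i j d : Int) : List GOp :=
  (PySem.List.pyRange 0 (d + 1) 1).flatMap (fun x =>
    (PySem.List.pyRange 0 (d + 1 - x) 1).flatMap (fun y =>
      ((if 0 ≤ i - x then
          (if 0 ≤ j - y then [GOp.cl (i - x).toNat (j - y).toNat] else []) ++
          (if j + y < C then [GOp.cl (i - x).toNat (j + y).toNat] else [])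
        else []) ++
       (if i + x < R then
          (if 0 ≤ j - y then [GOp.cl (i + x).toNat (j - y).toNat] else []) ++
          (if j + y < C then [GOp.cl (i + x).toNat (j + y).toNat] else [])
        else []))))

theorem bomb_eq_gapply (R C i j : Int) (g : List (List String)) (d : Int) :
    bomb R C i j g d = gapply (opsBomb R C i j d) g := by
  unfold bomb opsBomb gapply
  rw [foldl_flatMap_eq]
  apply PySem.List.foldl_congr_mem
  intro b x _
  rw [foldl_flatMap_eq]
  apply PySem.List.foldl_congr_mem
  intro b' y _
  rw [List.foldl_append]
  by_cases h1 : 0 ≤ i - x <;> by_cases h2 : 0 ≤ j - y <;> by_cases h3 : j + y < C <;>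
    by_cases h4 : i + x < R <;>
    simp only [h1, h2, h3, h4, if_true, if_false, List.foldl_cons, List.foldl_nil,
      List.foldl_append, gstep, clearIf, getCell, setCell]

theorem st_not_mem_opsBomb (R C i j d : Int) (a b : Nat) :
    GOp.st a b ∉ opsBomb R C i j d := by
  intro h
  simp only [opsBomb, List.mem_flatMap, List.mem_append] at h
  obtain ⟨x, -, y, -, h⟩ := h
  rcases h with h | h <;> (revert h; split_ifs <;> simp)

theorem abs2_le_iff (p q d : Int) :
    |p| + |q| ≤ d ↔ p + q ≤ d ∧ p - q ≤ d ∧ -p + q ≤ d ∧ -p - q ≤ d := by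
  rcases abs_cases p with ⟨hp, hp'⟩ | ⟨hp, hp'⟩ <;> rcases abs_cases q with ⟨hq, hq'⟩ | ⟨hq, hq'⟩ <;>
    omega

theorem mem_opsBomb (R C i j d : Int) (hi : 0 ≤ i) (hiR : i < R) (hj : 0 ≤ j) (hjC : j < C)
    (a b : Nat) :
    GOp.cl a b ∈ opsBomb R C i j d ↔
      (a : Int) < R ∧ (b : Int) < C ∧ |(a : Int) - i| + |(b : Int) - j| ≤ d := by
  rw [abs2_le_iff]
  constructor
  · intro h
    simp only [opsBomb, List.mem_flatMap, List.mem_append, PySem.List.mem_pyRange_one] at h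
    obtain ⟨x, ⟨hx0, hx1⟩, y, ⟨hy0, hy1⟩, h⟩ := h
    rcases h with h | h <;> revert h <;> split_ifs with c1 c2 c3 <;>
      simp only [List.mem_append, List.mem_singleton, List.not_mem_nil, GOp.cl.injEq,
        false_or, or_false] <;> intro h <;>
      first
        | exact absurd h not_false
        | (rcases h with ⟨rfl, rfl⟩ | ⟨rfl, rfl⟩ <;> refine ⟨by omega, by omega, ?_, ?_, ?_, ?_⟩ <;>
            omega)
  · rintro ⟨haR, hbC, h1, h2, h3, h4⟩
    simp only [opsBomb, List.mem_flatMap, List.mem_append, PySem.List.mem_pyRange_one]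
    rcases le_total ((a : Int)) i with hai | hai <;> rcases le_total ((b : Int)) j with hbj | hbj
    · refine ⟨i - a, ⟨by omega, by omega⟩, j - b, ⟨by omega, by omega⟩, Or.inl ?_⟩
      rw [if_pos (by omega)]
      refine List.mem_append_left _ ?_
      rw [if_pos (by omega)]
      simp only [List.mem_singleton, GOp.cl.injEq]
      omega
    · refine ⟨i - a, ⟨by omega, by omega⟩, b - j, ⟨by omega, by omega⟩, Or.inl ?_⟩
      rw [if_pos (by omega)]
      refine List.mem_append_right _ ?_
      rw [if_pos (by omega)]
      simp only [List.mem_singleton, GOp.cl.injEq]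
      omega
    · refine ⟨a - i, ⟨by omega, by omega⟩, j - b, ⟨by omega, by omega⟩, Or.inr ?_⟩
      rw [if_pos (by omega)]
      refine List.mem_append_left _ ?_
      rw [if_pos (by omega)]
      simp only [List.mem_singleton, GOp.cl.injEq]
      omega
    · refine ⟨a - i, ⟨by omega, by omega⟩, b - j, ⟨by omega, by omega⟩, Or.inr ?_⟩
      rw [if_pos (by omega)]
      refine List.mem_append_right _ ?_
      rw [if_pos (by omega)]
      simp only [List.mem_singleton, GOp.cl.injEq]
      omega

-- the whole of A's processing as one op list
def cellops (R C : Int) (B : List (List String)) (p : Int × Int) : List GOp :=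
  if getCell B p.1 p.2 ≠ "." ∧ getCell B p.1 p.2 ≠ "#" then
    opsBomb R C p.1 p.2 ((PySem.Int.ofStr? (getCell B p.1 p.2)).getD 0) ++
      [GOp.st p.1.toNat p.2.toNat]
  else []

def cells (R C : Int) : List (Int × Int) :=
  (PySem.List.pyRange 0 R 1).flatMap (fun i =>
    (PySem.List.pyRange 0 C 1).map (fun j => (i, j)))

def fstep (R C : Int) (g : List (List String)) (p : Int × Int) : List (List String) :=
  if getCell g p.1 p.2 ≠ "." ∧ getCell g p.1 p.2 ≠ "#" then
    setCell (bomb R C p.1 p.2 g ((PySem.Int.ofStr? (getCell g p.1 p.2)).getD 0)) p.1 p.2 "."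
  else g

theorem f_eq_foldl_cells (R C : Int) (B : List (List String)) :
    f R C B = (cells R C).foldl (fstep R C) B := by
  unfold f cells fstep
  rw [foldl_flatMap_eq]
  apply PySem.List.foldl_congr_mem
  intro g i _
  rw [List.foldl_map]

theorem mem_cells (R C : Int) (p : Int × Int) :
    p ∈ cells R C ↔ 0 ≤ p.1 ∧ p.1 < R ∧ 0 ≤ p.2 ∧ p.2 < C := by
  cases p with | mk i j =>
  simp [cells, List.mem_flatMap, PySem.List.mem_pyRange_one]
  tauto

theorem nodup_cells (R C : Int) : (cells R C).Nodup := by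
  unfold cells
  rw [List.nodup_flatMap]
  constructor
  · intro i _
    exact (PySem.List.nodup_pyRange_one 0 C).map (fun a b h => by simpa using h)
  · refine (PySem.List.pairwise_lt_pyRange_one 0 R).imp ?_
    intro i i' hlt p hp hp'
    simp only [List.mem_map] at hp hp'
    obtain ⟨j, -, rfl⟩ := hp
    obtain ⟨j', -, h⟩ := hp'
    exact absurd (congrArg Prod.fst h).symm (by simpa using hlt.ne)

-- validity of all ops generated for a grid whose first R×C box is in shape
theorem cellops_valid (R C : Int) (B : List (List String))
    (hval : ∀ a b : Nat, (a : Int) < R → (b : Int) < C → gvalid B (a, b))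
    (p : Int × Int) (hp : 0 ≤ p.1 ∧ p.1 < R ∧ 0 ≤ p.2 ∧ p.2 < C) :
    ∀ o ∈ cellops R C B p, gvalid B (gposOf o) := by
  obtain ⟨hp1, hp2, hp3, hp4⟩ := hp
  intro o ho
  unfold cellops at ho
  split at ho
  · rcases List.mem_append.mp ho with ho | ho
    · cases o with
      | st a b => exact absurd ho (st_not_mem_opsBomb _ _ _ _ _ a b)
      | cl a b =>
        obtain ⟨haR, hbC, -⟩ := (mem_opsBomb _ _ _ _ _ hp1 hp2 hp3 hp4 a b).mp ho
        exact hval a b haR hbC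
    · rw [List.mem_singleton] at ho
      subst ho
      refine hval p.1.toNat p.2.toNat ?_ ?_ <;> omega
  · exact absurd ho (List.not_mem_nil)

-- main loop invariant: A's remaining processing, started from 'gapply P B', appends its op lists
theorem loop_eq (R C : Int) (B : List (List String))
    (hval : ∀ a b : Nat, (a : Int) < R → (b : Int) < C → gvalid B (a, b)) :
    ∀ (S : List (Int × Int)) (P : List GOp),
      S.Nodup →
      (∀ p ∈ S, 0 ≤ p.1 ∧ p.1 < R ∧ 0 ≤ p.2 ∧ p.2 < C) →
      (∀ p ∈ S, GOp.st p.1.toNat p.2.toNat ∉ P) →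
      (∀ o ∈ P, gvalid B (gposOf o)) →
      S.foldl (fstep R C) (gapply P B) = gapply (P ++ S.flatMap (cellops R C B)) B := by
  intro S
  induction S with
  | nil => intro P _ _ _ _; simp
  | cons p S' ih =>
    intro P hnd hbox hstP hvP
    obtain ⟨hp1, hp2, hp3, hp4⟩ := hbox p List.mem_cons_self
    have hstp : GOp.st p.1.toNat p.2.toNat ∉ P := hstP p List.mem_cons_self
    have hvchar := gapply_char P B hvP p.1.toNat p.2.toNat
    rw [if_neg hstp] at hvchar
    have hcur : getCell (gapply P B) p.1 p.2 =
        if GOp.cl p.1.toNat p.2.toNat ∈ P ∧ getCell B p.1 p.2 = "#" then "."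
        else getCell B p.1 p.2 := hvchar
    rw [List.foldl_cons]
    by_cases hb : getCell B p.1 p.2 ≠ "." ∧ getCell B p.1 p.2 ≠ "#"
    · have hcur' : getCell (gapply P B) p.1 p.2 = getCell B p.1 p.2 := by
        rw [hcur, if_neg]
        rintro ⟨-, h⟩
        exact hb.2 h
      have hfs : fstep R C (gapply P B) p = gapply (P ++ cellops R C B p) B := by
        unfold fstep
        rw [if_pos (by rw [hcur']; exact hb)]
        rw [hcur', bomb_eq_gapply]
        unfold cellops
        rw [if_pos hb, ← List.append_assoc, gapply_append, gapply_append]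
        rfl
      have hvP' : ∀ o ∈ P ++ cellops R C B p, gvalid B (gposOf o) := by
        intro o ho
        rcases List.mem_append.mp ho with ho | ho
        · exact hvP o ho
        · exact cellops_valid R C B hval p ⟨hp1, hp2, hp3, hp4⟩ o ho
      have hstP' : ∀ q ∈ S', GOp.st q.1.toNat q.2.toNat ∉ P ++ cellops R C B p := by
        intro q hq hmem
        rcases List.mem_append.mp hmem with hm | hm
        · exact hstP q (List.mem_cons_of_mem _ hq) hm
        · unfold cellops at hm
          rw [if_pos hb] at hm
          rcases List.mem_append.mp hm with hm | hm
          · exact st_not_mem_opsBomb _ _ _ _ _ _ _ hm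
          · rw [List.mem_singleton, GOp.st.injEq] at hm
            obtain ⟨hq1, hq2, hq3, hq4⟩ := hbox q (List.mem_cons_of_mem _ hq)
            have hqp : q = p := by
              have e1 : q.1 = p.1 := by omega
              have e2 : q.2 = p.2 := by omega
              exact Prod.ext e1 e2
            exact (List.nodup_cons.mp hnd).1 (hqp ▸ hq)
      rw [hfs, ih (P ++ cellops R C B p) (List.nodup_cons.mp hnd).2
        (fun q hq => hbox q (List.mem_cons_of_mem _ hq)) hstP' hvP',
        List.flatMap_cons, List.append_assoc]
    · have hcop : cellops R C B p = [] := by unfold cellops; rw [if_neg hb]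
      have hfs : fstep R C (gapply P B) p = gapply P B := by
        unfold fstep
        rw [if_neg]
        rw [hcur]
        by_cases hP : GOp.cl p.1.toNat p.2.toNat ∈ P ∧ getCell B p.1 p.2 = "#"
        · rw [if_pos hP]; simp
        · rw [if_neg hP]; exact hb
      rw [hfs, List.flatMap_cons, hcop, List.nil_append]
      exact ih P (List.nodup_cons.mp hnd).2 (fun q hq => hbox q (List.mem_cons_of_mem _ hq))
        (fun q hq => hstP q (List.mem_cons_of_mem _ hq)) hvP

def opsAll (R C : Int) (B : List (List String)) : List GOp :=
  (cells R C).flatMap (cellops R C B)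

theorem pre_valid (R C : Int) (B : List (List String)) (hpre : Pre_f R C B) :
    ∀ a b : Nat, (a : Int) < R → (b : Int) < C → gvalid B (a, b) := by
  intro a b haR hbC
  rcases hpre with h | h | ⟨hRlen, h⟩
  · omega
  · omega
  · have haB : a < B.length := by omega
    have hmem : B[a] ∈ B.take R.toNat := by
      have ha' : a < (B.take R.toNat).length := by simp; omega
      have : (B.take R.toNat)[a] = B[a] := List.getElem_take
      exact this ▸ List.getElem_mem ha'
    obtain ⟨hClen, -⟩ := h _ hmem
    refine ⟨haB, ?_⟩
    rw [List.getD_eq_getElem _ _ haB]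
    omega

-- B's processing as one op list: an unconditional set-to-'.' at every cell of the
-- R×C box that is a bomb or blasted
def altOps (R C : Int) (B : List (List String)) : List GOp :=
  (cells R C).flatMap (fun p =>
    if (getCell B p.1 p.2 ≠ "#" ∧ getCell B p.1 p.2 ≠ ".") ∨
        blasted (bombsOf R C B) p.1 p.2 = true then
      [GOp.st p.1.toNat p.2.toNat]
    else [])

theorem f_alt_eq_gapply (R C : Int) (B : List (List String)) :
    f_alt R C B = gapply (altOps R C B) B := by
  unfold f_alt altOps gapply cells
  rw [foldl_flatMap_eq, foldl_flatMap_eq]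
  apply PySem.List.foldl_congr_mem
  intro b i _
  rw [List.foldl_map]
  apply PySem.List.foldl_congr_mem
  intro b' j _
  split_ifs with hc
  · simp only [List.foldl_cons, List.foldl_nil, gstep, setCell]
  · rfl

theorem st_mem_altOps (R C : Int) (B : List (List String)) (a b : Nat) :
    GOp.st a b ∈ altOps R C B ↔
      (a : Int) < R ∧ (b : Int) < C ∧
        ((gget B a b ≠ "#" ∧ gget B a b ≠ ".") ∨
          blasted (bombsOf R C B) ((a : Int)) ((b : Int)) = true) := by
  unfold altOps
  rw [List.mem_flatMap]
  constructor
  · rintro ⟨p, hp, hin⟩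
    obtain ⟨hp1, hp2, hp3, hp4⟩ := (mem_cells R C p).mp hp
    revert hin
    split_ifs with hc <;> intro hin
    · rw [List.mem_singleton, GOp.st.injEq] at hin
      obtain ⟨ha, hb'⟩ := hin
      have e1 : ((a : Int)) = p.1 := by omega
      have e2 : ((b : Int)) = p.2 := by omega
      have egc : getCell B p.1 p.2 = gget B a b := by
        unfold getCell; rw [← e1, ← e2]; simp
      rw [egc, ← e1, ← e2] at hc
      exact ⟨by omega, by omega, hc⟩
    · exact absurd hin (List.not_mem_nil)
  · rintro ⟨haR, hbC, hc⟩
    refine ⟨((a : Int), (b : Int)),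
      (mem_cells R C _).mpr ⟨Int.natCast_nonneg a, haR, Int.natCast_nonneg b, hbC⟩, ?_⟩
    have hgc : getCell B ((a : Int)) ((b : Int)) = gget B a b := by unfold getCell; simp
    rw [if_pos (by rw [hgc]; exact hc)]
    simp

theorem cl_not_mem_altOps (R C : Int) (B : List (List String)) (a b : Nat) :
    GOp.cl a b ∉ altOps R C B := by
  intro h
  simp only [altOps, List.mem_flatMap] at h
  obtain ⟨p, -, h⟩ := h
  revert h
  split_ifs <;> simp

theorem st_mem_opsAll (R C : Int) (B : List (List String)) (a b : Nat) :
    GOp.st a b ∈ opsAll R C B ↔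
      (a : Int) < R ∧ (b : Int) < C ∧ gget B a b ≠ "." ∧ gget B a b ≠ "#" := by
  unfold opsAll
  rw [List.mem_flatMap]
  constructor
  · rintro ⟨p, hp, hin⟩
    obtain ⟨hp1, hp2, hp3, hp4⟩ := (mem_cells R C p).mp hp
    unfold cellops at hin
    revert hin
    split_ifs with hc <;> intro hin
    · rcases List.mem_append.mp hin with hm | hm
      · exact absurd hm (st_not_mem_opsBomb _ _ _ _ _ a b)
      · rw [List.mem_singleton, GOp.st.injEq] at hm
        obtain ⟨ha, hb'⟩ := hm
        have e1 : ((a : Int)) = p.1 := by omega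
        have e2 : ((b : Int)) = p.2 := by omega
        have egc : getCell B p.1 p.2 = gget B a b := by
          unfold getCell; rw [← e1, ← e2]; simp
        rw [egc] at hc
        exact ⟨by omega, by omega, hc⟩
    · exact absurd hin (List.not_mem_nil)
  · rintro ⟨haR, hbC, h1, h2⟩
    refine ⟨((a : Int), (b : Int)),
      (mem_cells R C _).mpr ⟨Int.natCast_nonneg a, haR, Int.natCast_nonneg b, hbC⟩, ?_⟩
    unfold cellops
    have hgc : getCell B ((a : Int)) ((b : Int)) = gget B a b := by unfold getCell; simp
    rw [if_pos (by rw [hgc]; exact ⟨h1, h2⟩)]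
    refine List.mem_append_right _ ?_
    simp

theorem cl_mem_opsAll (R C : Int) (B : List (List String)) (a b : Nat) :
    GOp.cl a b ∈ opsAll R C B ↔
      (a : Int) < R ∧ (b : Int) < C ∧ ∃ p : Int × Int,
        (0 ≤ p.1 ∧ p.1 < R ∧ 0 ≤ p.2 ∧ p.2 < C) ∧
        (getCell B p.1 p.2 ≠ "." ∧ getCell B p.1 p.2 ≠ "#") ∧
        |(a : Int) - p.1| + |(b : Int) - p.2| ≤
          (PySem.Int.ofStr? (getCell B p.1 p.2)).getD 0 := by
  unfold opsAll
  rw [List.mem_flatMap]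
  constructor
  · rintro ⟨p, hp, hin⟩
    obtain ⟨hp1, hp2, hp3, hp4⟩ := (mem_cells R C p).mp hp
    unfold cellops at hin
    revert hin
    split_ifs with hc <;> intro hin
    · rcases List.mem_append.mp hin with hm | hm
      · obtain ⟨h1, h2, h3⟩ := (mem_opsBomb _ _ _ _ _ hp1 hp2 hp3 hp4 a b).mp hm
        exact ⟨h1, h2, p, ⟨hp1, hp2, hp3, hp4⟩, hc, h3⟩
      · simp at hm
    · exact absurd hin (List.not_mem_nil)
  · rintro ⟨haR, hbC, p, hpbox, hc, hd⟩
    refine ⟨p, (mem_cells R C p).mpr hpbox, ?_⟩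
    unfold cellops
    rw [if_pos hc]
    refine List.mem_append_left _ ?_
    exact (mem_opsBomb _ _ _ _ _ hpbox.1 hpbox.2.1 hpbox.2.2.1 hpbox.2.2.2 a b).mpr
      ⟨haR, hbC, hd⟩

theorem blasted_iff (R C : Int) (B : List (List String)) (i j : Int) :
    blasted (bombsOf R C B) i j = true ↔
      ∃ p : Int × Int, (0 ≤ p.1 ∧ p.1 < R ∧ 0 ≤ p.2 ∧ p.2 < C) ∧
        (getCell B p.1 p.2 ≠ "." ∧ getCell B p.1 p.2 ≠ "#") ∧
        |i - p.1| + |j - p.2| ≤ (PySem.Int.ofStr? (getCell B p.1 p.2)).getD 0 := by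
  unfold blasted bombsOf
  rw [List.any_eq_true]
  constructor
  · rintro ⟨t, ht, hle⟩
    rw [decide_eq_true_eq] at hle
    simp only [List.mem_flatMap, List.mem_filterMap, PySem.List.mem_pyRange_one] at ht
    obtain ⟨x, ⟨hx0, hxR⟩, y, ⟨hy0, hyC⟩, heq⟩ := ht
    revert heq
    split_ifs with hc <;> intro heq
    · cases Option.some.inj heq
      exact ⟨(x, y), ⟨hx0, hxR, hy0, hyC⟩, ⟨hc.2, hc.1⟩, hle⟩
    · cases heq
  · rintro ⟨p, ⟨h1, h2, h3, h4⟩, hc, hd⟩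
    refine ⟨(p.1, p.2, (PySem.Int.ofStr? (getCell B p.1 p.2)).getD 0), ?_,
      by rw [decide_eq_true_eq]; exact hd⟩
    simp only [List.mem_flatMap, List.mem_filterMap, PySem.List.mem_pyRange_one]
    exact ⟨p.1, ⟨h1, h2⟩, p.2, ⟨h3, h4⟩, by rw [if_pos ⟨hc.2, hc.1⟩]⟩

-- ===== VERDICT (by name: the statement is the Claim_ definition above) =====
theorem f_spec : Claim_equal_f := by
  unfold Claim_equal_f
  intro R C B _ hpre
  unfold Spec_f
  have hval := pre_valid R C B hpre
  have hvops : ∀ o ∈ opsAll R C B, gvalid B (gposOf o) := by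
    intro o ho
    obtain ⟨p, hp, hin⟩ := List.mem_flatMap.mp ho
    exact cellops_valid R C B hval p ((mem_cells R C p).mp hp) o hin
  have hmain : f R C B = gapply (opsAll R C B) B := by
    rw [f_eq_foldl_cells]
    have h := loop_eq R C B hval (cells R C) [] (nodup_cells R C)
      (fun p hp => (mem_cells R C p).mp hp) (fun p _ => List.not_mem_nil)
      (fun o ho => absurd ho List.not_mem_nil)
    simpa [opsAll] using h
  have hvalt : ∀ o ∈ altOps R C B, gvalid B (gposOf o) := by
    intro o ho
    cases o with
    | cl a b => exact absurd ho (cl_not_mem_altOps R C B a b)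
    | st a b =>
      obtain ⟨haR, hbC, -⟩ := (st_mem_altOps R C B a b).mp ho
      exact hval a b haR hbC
  rw [hmain, f_alt_eq_gapply]
  apply List.ext_getElem
  · rw [gapply_length, gapply_length]
  intro i hi1 hi2
  rw [gapply_length] at hi1
  have hArow : (gapply (opsAll R C B) B).getD i [] = (gapply (opsAll R C B) B)[i] :=
    List.getD_eq_getElem _ [] (by rw [gapply_length]; omega)
  have hBrow' : (gapply (altOps R C B) B).getD i [] = (gapply (altOps R C B) B)[i] :=
    List.getD_eq_getElem _ [] (by rw [gapply_length]; omega)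
  have hBrow : B.getD i [] = B[i] := List.getD_eq_getElem _ [] (by omega)
  have hrowlenA : (gapply (opsAll R C B) B)[i].length = B[i].length := by
    have := gapply_row_length (opsAll R C B) B i
    rw [hArow, hBrow] at this; omega
  have hrowlenB : (gapply (altOps R C B) B)[i].length = B[i].length := by
    have := gapply_row_length (altOps R C B) B i
    rw [hBrow', hBrow] at this; omega
  apply List.ext_getElem
  · rw [hrowlenA, hrowlenB]
  intro j hj1 hj2
  rw [hrowlenA] at hj1
  have hgetA : (gapply (opsAll R C B) B)[i][j] = gget (gapply (opsAll R C B) B) i j := by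
    unfold gget
    rw [hArow, List.getD_eq_getElem _ "" (by omega)]
  have hgetB : (gapply (altOps R C B) B)[i][j] = gget (gapply (altOps R C B) B) i j := by
    unfold gget
    rw [hBrow', List.getD_eq_getElem _ "" (by rw [hrowlenB]; omega)]
  rw [hgetA, hgetB, gapply_char (opsAll R C B) B hvops i j,
    gapply_char (altOps R C B) B hvalt i j]
  have hclBno : ¬ (GOp.cl i j ∈ altOps R C B ∧ gget B i j = "#") :=
    fun h => cl_not_mem_altOps R C B i j h.1
  rw [if_neg hclBno]
  have hstiff := st_mem_opsAll R C B i j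
  have hcliff := cl_mem_opsAll R C B i j
  have hstalt := st_mem_altOps R C B i j
  have hbl := blasted_iff R C B (i : Int) (j : Int)
  have hcb : GOp.cl i j ∈ opsAll R C B → blasted (bombsOf R C B) (i : Int) (j : Int) = true :=
    fun h => hbl.mpr (hcliff.mp h).2.2
  have hbc : (i : Int) < R → (j : Int) < C →
      blasted (bombsOf R C B) (i : Int) (j : Int) = true → GOp.cl i j ∈ opsAll R C B :=
    fun h1 h2 h => hcliff.mpr ⟨h1, h2, hbl.mp h⟩
  by_cases hbox : (i : Int) < R ∧ (j : Int) < C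
  · by_cases hbomb : gget B i j ≠ "." ∧ gget B i j ≠ "#"
    · have hstA : GOp.st i j ∈ opsAll R C B := hstiff.mpr ⟨hbox.1, hbox.2, hbomb⟩
      have hstB : GOp.st i j ∈ altOps R C B :=
        hstalt.mpr ⟨hbox.1, hbox.2, Or.inl ⟨hbomb.2, hbomb.1⟩⟩
      rw [if_pos hstA, if_pos hstB]
    · have hstA : GOp.st i j ∉ opsAll R C B := fun h => hbomb (hstiff.mp h).2.2
      rw [if_neg hstA]
      by_cases hsharp : gget B i j = "#"
      · by_cases hcl : GOp.cl i j ∈ opsAll R C B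
        · have hstB : GOp.st i j ∈ altOps R C B :=
            hstalt.mpr ⟨hbox.1, hbox.2, Or.inr (hcb hcl)⟩
          rw [if_pos ⟨hcl, hsharp⟩, if_pos hstB]
        · have hstB : GOp.st i j ∉ altOps R C B := by
            intro h
            rcases (hstalt.mp h).2.2 with h' | h'
            · exact h'.1 hsharp
            · exact hcl (hbc hbox.1 hbox.2 h')
          rw [if_neg (fun h => hcl h.1), if_neg hstB]
      · have hdot : gget B i j = "." := by by_contra hne; exact hbomb ⟨hne, hsharp⟩
        rw [if_neg (fun h => hsharp h.2)]
        by_cases hstB : GOp.st i j ∈ altOps R C B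
        · rw [if_pos hstB, hdot]
        · rw [if_neg hstB]
  · have hstA : GOp.st i j ∉ opsAll R C B := fun h =>
      hbox ⟨(hstiff.mp h).1, (hstiff.mp h).2.1⟩
    have hstB : GOp.st i j ∉ altOps R C B := fun h =>
      hbox ⟨(hstalt.mp h).1, (hstalt.mp h).2.1⟩
    have hclA : GOp.cl i j ∉ opsAll R C B := fun h =>
      hbox ⟨(hcliff.mp h).1, (hcliff.mp h).2.1⟩
    rw [if_neg hstA, if_neg hstB, if_neg (fun h => hclA h.1)]
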